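-- pv_equiv track=rewrite | github.com/Anoop-Parashar/COL7361-Assignments | A2/q2/.ipynb_checkpoints/forest_fire-checkpoint.py | multisource_bfs
-- ===== SOURCE A (Python) =====
-- from collections import defaultdict, deque
--
-- def multisource_bfs(adj, seeds, h=None):
--     """BFS from all seeds; stop at depth h if given."""
--     visited = set(seeds)
--     queue = deque((s, 0) for s in seeds)
--     while queue:
--         u, d = queue.popleft()
--         if h is not None and d >= h:
--             continue
--         for (v, _) in adj.get(u, []):
--             if v not in visited:
--                 visited.add(v)
--                 queue.append((v, d + 1))
--     return visited
-- ===== SOURCE B (Python) =====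
-- def multisource_bfs(adj, seeds, h=None):
--     """Level-synchronous BFS from all seeds; expand at most h levels if h is given."""
--     visited = set(seeds)
--     frontier = list(seeds)
--     depth = 0
--     while frontier and (h is None or depth < h):
--         nxt = []
--         for u in frontier:
--             for (v, _) in adj.get(u, []):
--                 if v not in visited:
--                     visited.add(v)
--                     nxt.append(v)
--         frontier = nxt
--         depth += 1
--     return visited
-- ===== Notes on version B (the rewrite author's own statement) =====
-- stated objective: simpler
-- what changed: Replaced the deque of (node, depth) pairs by a level-synchronous BFS: a plain frontier list expanded whole level at a time, with the depth kept as a single loop counter instead of being stored per queue entry.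
import Mathlib
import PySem

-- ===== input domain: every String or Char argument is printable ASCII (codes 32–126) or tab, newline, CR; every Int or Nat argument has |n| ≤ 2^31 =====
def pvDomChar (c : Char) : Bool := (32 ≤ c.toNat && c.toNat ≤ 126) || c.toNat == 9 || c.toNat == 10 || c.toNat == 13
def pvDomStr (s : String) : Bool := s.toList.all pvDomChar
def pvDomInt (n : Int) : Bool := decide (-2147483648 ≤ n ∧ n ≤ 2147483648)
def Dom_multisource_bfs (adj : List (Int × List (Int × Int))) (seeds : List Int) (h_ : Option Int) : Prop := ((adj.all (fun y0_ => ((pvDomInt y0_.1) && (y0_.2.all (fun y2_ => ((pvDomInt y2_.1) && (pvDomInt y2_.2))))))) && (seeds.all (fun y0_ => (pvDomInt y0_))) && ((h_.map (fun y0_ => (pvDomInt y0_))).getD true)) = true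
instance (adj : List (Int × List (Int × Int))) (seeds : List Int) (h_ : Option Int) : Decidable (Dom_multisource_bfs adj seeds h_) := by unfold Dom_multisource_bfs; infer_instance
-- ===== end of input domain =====

-- B replaces A's deque of (node, depth) pairs by a level-synchronous frontier loop with a
-- single depth counter; objective: simpler (no per-entry depths, no deque). Same return value.
-- Both loops are written with an explicit fuel argument that is proved never to run out
-- (pure totality device; it mirrors no Python behaviour).

-- ===== PORT A =====
-- number of adjacency entries; used only to size the fuel of the loops
def pvEdges (adj : List (Int × List (Int × Int))) : Nat :=
  ((adj.flatMap (fun p => p.2)).map (fun vw => vw.1)).length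

-- 'h is not None and d >= h'
def pvStopA (h_ : Option Int) (d : Int) : Bool :=
  match h_ with | some hh => decide (hh ≤ d) | none => false

-- the body of A's 'for (v, _) in adj.get(u, [])' loop, appending (v, d+1) to the queue
def pvStepA (d : Int) (st : PySem.Set Int × List (Int × Int)) (vw : Int × Int) :
    PySem.Set Int × List (Int × Int) :=
  if PySem.Set.contains st.1 vw.1 then st
  else (PySem.Set.add st.1 vw.1, st.2 ++ [(vw.1, d + 1)])

-- A's 'while queue' loop
def pvLoopA (adj : List (Int × List (Int × Int))) (h_ : Option Int) :
    Nat → PySem.Set Int → List (Int × Int) → PySem.Set Int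
  | 0, vis, _ => vis
  | _ + 1, vis, [] => vis
  | f + 1, vis, (u, d) :: q =>
      if pvStopA h_ d then pvLoopA adj h_ f vis q
      else
        let st := ((PySem.Dict.mk adj).getD u []).foldl (pvStepA d) (vis, q)
        pvLoopA adj h_ f st.1 st.2

def multisource_bfs (adj : List (Int × List (Int × Int))) (seeds : List Int) (h_ : Option Int) : List Int :=
  pvLoopA adj h_ (seeds.length + 2 * pvEdges adj + 1) (PySem.Set.ofList seeds)
    (seeds.map (fun s => (s, 0)))

-- ===== PORT B =====
-- 'h is None or depth < h'
def pvContB (h_ : Option Int) (depth : Int) : Bool :=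
  match h_ with | none => true | some hh => decide (depth < hh)

-- body of B's inner 'for (v, _) in adj.get(u, [])' loop, appending v to nxt
def pvStepB (st : PySem.Set Int × List Int) (vw : Int × Int) : PySem.Set Int × List Int :=
  if PySem.Set.contains st.1 vw.1 then st
  else (PySem.Set.add st.1 vw.1, st.2 ++ [vw.1])

-- B's 'for u in frontier' loop over one level
def pvLevelB (adj : List (Int × List (Int × Int))) (st : PySem.Set Int × List Int)
    (frontier : List Int) : PySem.Set Int × List Int :=
  frontier.foldl (fun st u => ((PySem.Dict.mk adj).getD u []).foldl pvStepB st) st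

-- B's 'while frontier and …' loop
def pvLoopB (adj : List (Int × List (Int × Int))) (h_ : Option Int) :
    Nat → PySem.Set Int → List Int → Int → PySem.Set Int
  | 0, vis, _, _ => vis
  | f + 1, vis, frontier, depth =>
      if !frontier.isEmpty && pvContB h_ depth then
        let st := pvLevelB adj (vis, []) frontier
        pvLoopB adj h_ f st.1 st.2 (depth + 1)
      else vis

def multisource_bfs_alt (adj : List (Int × List (Int × Int))) (seeds : List Int) (h_ : Option Int) : List Int :=
  pvLoopB adj h_ (pvEdges adj + 2) (PySem.Set.ofList seeds) seeds 0

-- ===== PRECONDITION & SPEC =====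
def Spec_multisource_bfs (adj : List (Int × List (Int × Int))) (seeds : List Int) (h_ : Option Int) (out : List Int) : Prop := out = multisource_bfs_alt adj seeds h_
instance (adj : List (Int × List (Int × Int))) (seeds : List Int) (h_ : Option Int) (out : List Int) : Decidable (Spec_multisource_bfs adj seeds h_ out) := by unfold Spec_multisource_bfs; infer_instance

-- ===== CLAIM (what is proved, stated in full; the proofs are below) =====
def Claim_equal_multisource_bfs : Prop := ∀ (adj : List (Int × List (Int × Int))) (seeds : List Int) (h_ : Option Int), Dom_multisource_bfs adj seeds h_ → Spec_multisource_bfs adj seeds h_ (multisource_bfs adj seeds h_)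

-- ===== LEMMAS AND PROOFS =====

-- the set of possible BFS targets, and the count of not-yet-visited ones (proof measure)
def pvT (adj : List (Int × List (Int × Int))) : Finset Int :=
  ((adj.flatMap (fun p => p.2)).map (fun vw => vw.1)).toFinset

def pvU (adj : List (Int × List (Int × Int))) (vis : PySem.Set Int) : Nat :=
  (pvT adj \ vis.toFinset).card

theorem pv_getD_mem_T (adj : List (Int × List (Int × Int))) (u : Int) :
    ∀ vw ∈ (PySem.Dict.mk adj).getD u [], vw.1 ∈ pvT adj := by
  have key : ∀ vw ∈ (PySem.Dict.mk adj).getD u [], vw ∈ adj.flatMap (fun p => p.2) := by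
    induction adj with
    | nil =>
        intro vw hvw
        simp [PySem.Dict.getD, PySem.Dict.get?] at hvw
    | cons p rest ih =>
        intro vw hvw
        obtain ⟨k, l⟩ := p
        rw [PySem.Dict.getD_eq_get?_getD, PySem.Dict.get?_mk_cons] at hvw
        rw [List.flatMap_cons]
        by_cases hk : (k == u) = true
        · rw [if_pos hk] at hvw
          exact List.mem_append_left _ (by simpa using hvw)
        · rw [if_neg hk] at hvw
          exact List.mem_append_right _
            (ih vw (by rw [PySem.Dict.getD_eq_get?_getD]; exact hvw))
  intro vw hvw
  unfold pvT
  rw [List.mem_toFinset]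
  exact List.mem_map_of_mem (key vw hvw)

-- one B-step accounting: the pair (frontier length + unvisited count) never grows
theorem pv_stepB_acct (adj : List (Int × List (Int × Int)))
    (st : PySem.Set Int × List Int) (vw : Int × Int) (hvw : vw.1 ∈ pvT adj) :
    (pvStepB st vw).2.length + pvU adj (pvStepB st vw).1 ≤ st.2.length + pvU adj st.1 ∧
    st.2.length ≤ (pvStepB st vw).2.length := by
  unfold pvStepB
  by_cases hm : vw.1 ∈ st.1
  · rw [if_pos ((PySem.Set.contains_iff _ _).2 hm)]
    exact ⟨le_refl _, le_refl _⟩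
  · rw [if_neg (fun hc => hm ((PySem.Set.contains_iff _ _).1 hc))]
    have hadd : PySem.Set.add st.1 vw.1 = st.1 ++ [vw.1] := PySem.Set.add_of_not_mem hm
    have hU : pvU adj (PySem.Set.add st.1 vw.1) = pvU adj st.1 - 1 := by
      unfold pvU
      rw [hadd]
      rw [show (st.1 ++ [vw.1]).toFinset = insert vw.1 st.1.toFinset by
        simp [List.toFinset_append]]
      rw [Finset.sdiff_insert, Finset.card_erase_of_mem (by simp [hvw, hm])]
    have hUpos : 1 ≤ pvU adj st.1 := by
      unfold pvU
      exact Finset.card_pos.2 ⟨vw.1, by simp [hvw, hm]⟩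
    constructor
    · simp only [List.length_append, List.length_cons, List.length_nil, hU]
      omega
    · simp

theorem pv_inner_acct (adj : List (Int × List (Int × Int))) (ns : List (Int × Int))
    (hns : ∀ vw ∈ ns, vw.1 ∈ pvT adj) (st : PySem.Set Int × List Int) :
    (ns.foldl pvStepB st).2.length + pvU adj (ns.foldl pvStepB st).1 ≤
      st.2.length + pvU adj st.1 ∧ st.2.length ≤ (ns.foldl pvStepB st).2.length := by
  induction ns generalizing st with
  | nil => exact ⟨le_refl _, le_refl _⟩
  | cons vw rest ih =>
      have h1 := pv_stepB_acct adj st vw (hns vw (List.mem_cons_self ..))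
      have h2 := ih (fun x hx => hns x (List.mem_cons_of_mem _ hx)) (pvStepB st vw)
      rw [List.foldl_cons]
      exact ⟨le_trans h2.1 h1.1, le_trans h1.2 h2.2⟩

theorem pv_level_acct (adj : List (Int × List (Int × Int))) (L : List Int)
    (st : PySem.Set Int × List Int) :
    (pvLevelB adj st L).2.length + pvU adj (pvLevelB adj st L).1 ≤
      st.2.length + pvU adj st.1 ∧ st.2.length ≤ (pvLevelB adj st L).2.length := by
  induction L generalizing st with
  | nil => exact ⟨le_refl _, le_refl _⟩
  | cons u rest ih =>
      have h1 := pv_inner_acct adj ((PySem.Dict.mk adj).getD u []) (pv_getD_mem_T adj u) st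
      have h2 := ih (((PySem.Dict.mk adj).getD u []).foldl pvStepB st)
      unfold pvLevelB at h2 ⊢
      rw [List.foldl_cons]
      exact ⟨le_trans h2.1 h1.1, le_trans h1.2 h2.2⟩

-- A's inner fold tracks B's inner fold: the A-queue is a fixed prefix P plus the B-list tagged d+1
theorem pv_rel_inner (d : Int) (ns : List (Int × Int)) :
    ∀ (vis : PySem.Set Int) (P : List (Int × Int)) (M : List Int),
    ns.foldl (pvStepA d) (vis, P ++ M.map (fun v => (v, d + 1))) =
      ((ns.foldl pvStepB (vis, M)).1,
        P ++ (ns.foldl pvStepB (vis, M)).2.map (fun v => (v, d + 1))) := by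
  induction ns with
  | nil => intro vis P M; rfl
  | cons vw rest ih =>
      intro vis P M
      rw [List.foldl_cons, List.foldl_cons]
      by_cases hc : PySem.Set.contains vis vw.1 = true
      · rw [show pvStepA d (vis, P ++ M.map (fun v => (v, d + 1))) vw
              = (vis, P ++ M.map (fun v => (v, d + 1))) by unfold pvStepA; rw [if_pos hc]]
        rw [show pvStepB (vis, M) vw = (vis, M) by unfold pvStepB; rw [if_pos hc]]
        exact ih vis P M
      · rw [show pvStepA d (vis, P ++ M.map (fun v => (v, d + 1))) vw
              = (PySem.Set.add vis vw.1, P ++ (M ++ [vw.1]).map (fun v => (v, d + 1))) by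
            unfold pvStepA
            rw [if_neg hc]
            simp [List.map_append, List.append_assoc]]
        rw [show pvStepB (vis, M) vw = (PySem.Set.add vis vw.1, M ++ [vw.1]) by
            unfold pvStepB; rw [if_neg hc]]
        exact ih (PySem.Set.add vis vw.1) P (M ++ [vw.1])

-- processing one whole level in A = pvLevelB
theorem pv_A_level (adj : List (Int × List (Int × Int))) (h_ : Option Int) (d : Int)
    (hd : pvStopA h_ d = false) (L : List Int) :
    ∀ (M : List Int) (vis : PySem.Set Int) (f : Nat), L.length ≤ f →
    pvLoopA adj h_ f vis (L.map (fun v => (v, d)) ++ M.map (fun v => (v, d + 1))) =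
      pvLoopA adj h_ (f - L.length) (pvLevelB adj (vis, M) L).1
        ((pvLevelB adj (vis, M) L).2.map (fun v => (v, d + 1))) := by
  induction L with
  | nil =>
      intro M vis f _
      simp [pvLevelB]
  | cons u rest ih =>
      intro M vis f hf
      cases f with
      | zero => simp at hf
      | succ f =>
          rw [show ((u :: rest).map (fun v => (v, d)) ++ M.map (fun v => (v, d + 1)))
                = (u, d) :: (rest.map (fun v => (v, d)) ++ M.map (fun v => (v, d + 1))) by
              simp]
          rw [pvLoopA, if_neg (by rw [hd]; simp)]
          rw [pv_rel_inner d ((PySem.Dict.mk adj).getD u []) vis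
            (rest.map (fun v => (v, d))) M]
          rw [ih (((PySem.Dict.mk adj).getD u []).foldl pvStepB (vis, M)).2
            (((PySem.Dict.mk adj).getD u []).foldl pvStepB (vis, M)).1
            f (by simpa using hf)]
          rw [show (f + 1) - (u :: rest).length = f - rest.length by simp]
          rfl

theorem pv_A_drain (adj : List (Int × List (Int × Int))) (h_ : Option Int)
    (q : List (Int × Int)) : ∀ (f : Nat) (vis : PySem.Set Int), q.length ≤ f →
    (∀ e ∈ q, pvStopA h_ e.2 = true) → pvLoopA adj h_ f vis q = vis := by
  induction q with
  | nil =>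
      intro f vis _ _
      cases f <;> rfl
  | cons e rest ih =>
      intro f vis hf hstop
      obtain ⟨u, d⟩ := e
      cases f with
      | zero => simp at hf
      | succ f =>
          rw [pvLoopA, if_pos (hstop (u, d) (List.mem_cons_self ..))]
          exact ih f vis (by simpa using hf)
            (fun e he => hstop e (List.mem_cons_of_mem _ he))

theorem pv_main (adj : List (Int × List (Int × Int))) (h_ : Option Int) :
    ∀ (fB : Nat) (vis : PySem.Set Int) (L : List Int) (d : Int) (fA : Nat),
    L.length + 2 * pvU adj vis + 1 ≤ fA → pvU adj vis + 2 ≤ fB →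
    pvLoopA adj h_ fA vis (L.map (fun v => (v, d))) = pvLoopB adj h_ fB vis L d := by
  intro fB
  induction fB with
  | zero => intro vis L d fA hA hB; omega
  | succ f ih =>
      intro vis L d fA hA hB
      cases L with
      | nil =>
          rw [pvLoopB]
          simp only [List.isEmpty_nil, Bool.not_true, Bool.false_and, Bool.false_eq_true,
            if_false]
          cases fA with
          | zero => omega
          | succ fA => rfl
      | cons x xs =>
          by_cases hcont : pvContB h_ d = true
          · have hd : pvStopA h_ d = false := by
              cases h_ with
              | none => rfl
              | some hh => simp [pvContB] at hcont; simp [pvStopA]; omega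
            rw [pvLoopB, if_pos (by simp [hcont])]
            show _ = pvLoopB adj h_ f (pvLevelB adj (vis, []) (x :: xs)).1
              (pvLevelB adj (vis, []) (x :: xs)).2 (d + 1)
            rw [show (x :: xs).map (fun v => (v, d))
                  = (x :: xs).map (fun v => (v, d)) ++ ([] : List Int).map (fun v => (v, d + 1)) by simp]
            rw [pv_A_level adj h_ d hd (x :: xs) [] vis fA (by omega)]
            have acct := pv_level_acct adj (x :: xs) (vis, [])
            cases hst2 : (pvLevelB adj (vis, []) (x :: xs)).2 with
            | nil =>
                cases f with
                | zero => omega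
                | succ f' =>
                    rw [pvLoopB]
                    simp only [List.isEmpty_nil, Bool.not_true, Bool.false_and,
                      Bool.false_eq_true, if_false, List.map_nil]
                    cases hfA' : fA - (x :: xs).length with
                    | zero => omega
                    | succ g => rfl
            | cons y ys =>
                rw [← hst2]
                rw [hst2] at acct
                rw [ih (pvLevelB adj (vis, []) (x :: xs)).1
                  (pvLevelB adj (vis, []) (x :: xs)).2 (d + 1) (fA - (x :: xs).length)
                  (by
                    rw [hst2]
                    simp only [List.length_cons, List.length_nil] at acct hA ⊢
                    omega)
                  (by
                    simp only [List.length_cons, List.length_nil] at acct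
                    omega)]
          · rw [pvLoopB, if_neg (by simp [hcont])]
            have hd : ∀ e ∈ (x :: xs).map (fun v => (v, d)), pvStopA h_ e.2 = true := by
              intro e he
              simp only [List.mem_map] at he
              obtain ⟨v, _, rfl⟩ := he
              cases h_ with
              | none => simp [pvContB] at hcont
              | some hh => simp [pvContB] at hcont; simp [pvStopA]; omega
            exact pv_A_drain adj h_ _ fA vis (by simp only [List.length_map]; omega) hd

-- ===== VERDICT (by name: the statement is the Claim_ definition above) =====
theorem multisource_bfs_spec : Claim_equal_multisource_bfs := by
  intro adj seeds h_ _
  show multisource_bfs adj seeds h_ = multisource_bfs_alt adj seeds h_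
  unfold multisource_bfs multisource_bfs_alt
  have hU : pvU adj (PySem.Set.ofList seeds) ≤ pvEdges adj := by
    unfold pvU pvEdges
    exact le_trans (Finset.card_le_card (Finset.sdiff_subset)) (List.toFinset_card_le _)
  exact pv_main adj h_ (pvEdges adj + 2) (PySem.Set.ofList seeds) seeds 0
    (seeds.length + 2 * pvEdges adj + 1) (by omega) (by omega)
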